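-- pv_equiv track=rewrite | github.com/markomijaljevic/algorithms | Battleship.py | calc
-- ===== SOURCE A (Python) =====
-- def calc(shipsExpand,T):
--     """
--     Function calculates number of sunken and damaged ships
--     """
--     hits = T.split(" ") # convert string to list
--     shipHit = 0
--     h = 0 # damaged ships counter
--     sunk = 0 # sunken ships counter
--
--     for ship in shipsExpand:
--         shiplist = ship.split(" ") # convert string to list
--         for hit in hits:
--             if hit in shiplist: # if ship is damaged
--                 del shiplist[shiplist.index(hit)] # delete cell ( position ) from list
--                 shipHit = 1 # count hit
--
--         if not shiplist: # if ship is destroyed, counter += 1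
--             sunk += 1
--             shipHit = 0
--         elif shipHit > 0: #if ship is damaged
--             h += 1
--             shipHit = 0
--
--     return str(sunk)+","+str(h) # return string of sunk and damaged ships
-- ===== SOURCE B (Python) =====
-- def calc(shipsExpand, T):
--     """Count sunk and damaged ships by comparing frequency tables instead of
--     mutating/deleting from the hit list."""
--     hitCount = {}
--     for cell in T.split(" "):
--         hitCount[cell] = hitCount.get(cell, 0) + 1
--     sunk = 0
--     damaged = 0
--     for ship in shipsExpand:
--         shipCount = {}
--         cells = ship.split(" ")
--         for cell in cells:
--             shipCount[cell] = shipCount.get(cell, 0) + 1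
--         hitsOn = sum(min(c, hitCount.get(cell, 0)) for cell, c in shipCount.items())
--         if hitsOn == len(cells):
--             sunk += 1
--         elif hitsOn > 0:
--             damaged += 1
--     return str(sunk) + "," + str(damaged)
-- ===== Notes on version B (the rewrite author's own statement) =====
-- stated objective: alternative
-- what changed: Replaces A's per-ship mutate-and-delete scan of the hit list (repeated membership tests and one-at-a-time deletions) with frequency tables built once: a hit tally and a per-ship cell tally, counting hits on a ship as the sum of min(cell count, hit count) and classifying by comparing that sum with the ship's size.
import Mathlib
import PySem

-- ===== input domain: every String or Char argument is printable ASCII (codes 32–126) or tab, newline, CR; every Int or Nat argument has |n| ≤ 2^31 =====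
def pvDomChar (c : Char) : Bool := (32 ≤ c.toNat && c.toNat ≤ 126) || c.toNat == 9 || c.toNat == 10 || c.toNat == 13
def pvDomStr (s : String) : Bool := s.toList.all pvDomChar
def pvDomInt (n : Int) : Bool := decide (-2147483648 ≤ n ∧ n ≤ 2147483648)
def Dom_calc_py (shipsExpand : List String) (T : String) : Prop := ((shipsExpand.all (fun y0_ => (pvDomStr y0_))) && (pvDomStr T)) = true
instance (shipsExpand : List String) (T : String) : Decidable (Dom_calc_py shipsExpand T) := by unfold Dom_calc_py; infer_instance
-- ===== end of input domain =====

-- B replaces A's per-ship mutate-and-delete scan of the hit list with frequency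
-- tables compared cell by cell (alternative algorithm, same return value).

-- s.split(" "): the separator is the nonempty literal " ", so split? is always
-- `some` and getD [] is exact
def pvSplit (s : String) : List String := (PySem.Str.split? s " ").getD []

-- ===== PORT A =====
-- inner loop body: 'if hit in shiplist: del shiplist[shiplist.index(hit)]; shipHit = 1'
def pvStepInner (p : List String × Int) (hit : String) : List String × Int :=
  if hit ∈ p.1 then (p.1.erase hit, 1) else p

-- outer loop body over one ship; state = (shipHit, h, sunk)
def pvStepShipA (hits : List String) (st : Int × Int × Int) (ship : String) : Int × Int × Int :=
  if (hits.foldl pvStepInner (pvSplit ship, st.1)).1 = [] then (0, st.2.1, st.2.2 + 1)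
  else if (hits.foldl pvStepInner (pvSplit ship, st.1)).2 > 0 then (0, st.2.1 + 1, st.2.2)
  else ((hits.foldl pvStepInner (pvSplit ship, st.1)).2, st.2.1, st.2.2)

def calc_py (shipsExpand : List String) (T : String) : String :=
  let s := shipsExpand.foldl (pvStepShipA (pvSplit T)) (0, 0, 0)
  PySem.Int.toStr s.2.2 ++ "," ++ PySem.Int.toStr s.2.1

-- ===== PORT B =====
-- 'd[cell] = d.get(cell, 0) + 1' tally loop
def pvTally (xs : List String) : PySem.Dict String Int :=
  xs.foldl (fun d cell => d.insert cell (d.getD cell 0 + 1)) PySem.Dict.empty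

-- 'sum(min(c, hitCount.get(cell, 0)) for cell, c in shipCount.items())'
def pvHitsOn (hitCount : PySem.Dict String Int) (cells : List String) : Int :=
  ((pvTally cells).items.map (fun p => min p.2 (hitCount.getD p.1 0))).sum

-- per-ship body; state = (sunk, damaged)
def pvStepShipB (hitCount : PySem.Dict String Int) (st : Int × Int) (ship : String) : Int × Int :=
  if pvHitsOn hitCount (pvSplit ship) = ((pvSplit ship).length : Int) then (st.1 + 1, st.2)
  else if pvHitsOn hitCount (pvSplit ship) > 0 then (st.1, st.2 + 1)
  else st

def calc_py_alt (shipsExpand : List String) (T : String) : String :=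
  let s := shipsExpand.foldl (pvStepShipB (pvTally (pvSplit T))) (0, 0)
  PySem.Int.toStr s.1 ++ "," ++ PySem.Int.toStr s.2

-- ===== PRECONDITION & SPEC =====
def Spec_calc_py (shipsExpand : List String) (T : String) (out : String) : Prop := out = calc_py_alt shipsExpand T
instance (shipsExpand : List String) (T : String) (out : String) : Decidable (Spec_calc_py shipsExpand T out) := by unfold Spec_calc_py; infer_instance

-- ===== CLAIM (what is proved, stated in full; the proofs are below) =====
def Claim_equal_calc_py : Prop := ∀ (shipsExpand : List String) (T : String), Dom_calc_py shipsExpand T → Spec_calc_py shipsExpand T (calc_py shipsExpand T)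

-- ===== LEMMAS AND PROOFS =====

-- A's inner loop: remaining multiplicity of x after all deletions
theorem pvInner_count (hits : List String) (l : List String) (f : Int) (x : String) :
    ((hits.foldl pvStepInner (l, f)).1).count x
      = l.count x - min (l.count x) (hits.count x) := by
  induction hits generalizing l f with
  | nil => simp
  | cons hd tl ih =>
    by_cases hmem : hd ∈ l
    · have h1 : 1 ≤ l.count hd := List.count_pos_iff.mpr hmem
      simp only [List.foldl_cons, pvStepInner, hmem, if_pos]
      rw [ih]
      have he := List.count_erase (a := x) (b := hd) (l := l)
      have hc := List.count_cons (a := x) (b := hd) (l := tl)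
      rcases eq_or_ne x hd with rfl | hx
      · simp only [beq_self_eq_true, if_pos] at he hc
        omega
      · have hb : (hd == x) = false := beq_eq_false_iff_ne.mpr (Ne.symm hx)
        have hb' : (x == hd) = false := beq_eq_false_iff_ne.mpr hx
        rw [hb] at he hc
        simp only [if_neg Bool.false_ne_true] at he hc
        omega
    · simp only [List.foldl_cons, pvStepInner, hmem, ite_false]
      rw [ih]
      rcases eq_or_ne x hd with rfl | hx
      · have h0 : l.count x = 0 := List.count_eq_zero.mpr hmem
        simp [h0]
      · have hb : (hd == x) = false := beq_eq_false_iff_ne.mpr (Ne.symm hx)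
        rw [List.count_cons, hb]
        simp

-- A's inner loop: the shipHit flag
theorem pvInner_flag (hits : List String) (l : List String) (f : Int) :
    (hits.foldl pvStepInner (l, f)).2
      = if ∃ hit ∈ hits, hit ∈ l then 1 else f := by
  induction hits generalizing l f with
  | nil => simp
  | cons hd tl ih =>
    by_cases hmem : hd ∈ l
    · simp only [List.foldl_cons, pvStepInner, hmem, if_pos]
      rw [ih, if_pos (show ∃ hit ∈ hd :: tl, hit ∈ l from ⟨hd, List.mem_cons_self, hmem⟩)]
      split <;> rfl
    · simp only [List.foldl_cons, pvStepInner, hmem, ite_false]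
      rw [ih]
      by_cases h : ∃ hit ∈ tl, hit ∈ l
      · rcases h with ⟨y, hy, hyl⟩
        rw [if_pos ⟨y, hy, hyl⟩, if_pos ⟨y, List.mem_cons_of_mem _ hy, hyl⟩]
      · rw [if_neg h, if_neg]
        rintro ⟨y, hy, hyl⟩
        rcases List.mem_cons.mp hy with rfl | hy'
        · exact hmem hyl
        · exact h ⟨y, hy', hyl⟩

-- remaining list empty ↔ every cell's multiplicity is covered by the hits
theorem pvInner_empty_iff (hits l : List String) (f : Int) :
    (hits.foldl pvStepInner (l, f)).1 = [] ↔ ∀ x ∈ l, l.count x ≤ hits.count x := by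
  constructor
  · intro hnil x hx
    have := pvInner_count hits l f x
    rw [hnil] at this
    simp only [List.count_nil] at this
    omega
  · intro hle
    rw [List.eq_nil_iff_forall_not_mem]
    intro x hx
    have hpos : 0 < ((hits.foldl pvStepInner (l, f)).1).count x := List.count_pos_iff.mpr hx
    rw [pvInner_count] at hpos
    by_cases hxl : x ∈ l
    · have := hle x hxl; omega
    · have : l.count x = 0 := List.count_eq_zero.mpr hxl
      omega

-- Nat sum cast to Int
theorem pvSum_cast (l : List String) (f : String → Nat) :
    ((l.map f).sum : Int) = (l.map (fun x => (f x : Int))).sum := by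
  induction l with
  | nil => simp
  | cons hd tl ih => simp [ih]

-- termwise ≤ makes sum equality pointwise
theorem pvSum_eq_iff (l : List String) (f g : String → Int) (h : ∀ x ∈ l, f x ≤ g x) :
    (l.map f).sum = (l.map g).sum ↔ ∀ x ∈ l, f x = g x := by
  induction l with
  | nil => simp
  | cons hd tl ih =>
    have hhd := h hd List.mem_cons_self
    have htl : ∀ x ∈ tl, f x ≤ g x := fun x hx => h x (List.mem_cons_of_mem _ hx)
    have hsum : (tl.map f).sum ≤ (tl.map g).sum := List.sum_le_sum htl
    simp only [List.map_cons, List.sum_cons]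
    constructor
    · intro heq
      have hfg : f hd = g hd := by omega
      have : (tl.map f).sum = (tl.map g).sum := by omega
      intro x hx
      rcases List.mem_cons.mp hx with rfl | hx'
      · exact hfg
      · exact ((ih htl).mp this) x hx'
    · intro hall
      rw [hall hd List.mem_cons_self,
          (ih htl).mpr (fun x hx => hall x (List.mem_cons_of_mem _ hx))]

-- a sum of nonnegatives is positive iff some term is
theorem pvSum_pos_iff (l : List String) (f : String → Int) (h : ∀ x ∈ l, 0 ≤ f x) :
    0 < (l.map f).sum ↔ ∃ x ∈ l, 0 < f x := by
  induction l with
  | nil => simp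
  | cons hd tl ih =>
    have hhd := h hd List.mem_cons_self
    have htl : ∀ x ∈ tl, 0 ≤ f x := fun x hx => h x (List.mem_cons_of_mem _ hx)
    have hnn : 0 ≤ (tl.map f).sum := List.sum_nonneg (by simpa using htl)
    simp only [List.map_cons, List.sum_cons, List.mem_cons]
    constructor
    · intro hpos
      by_cases h0 : 0 < f hd
      · exact ⟨hd, Or.inl rfl, h0⟩
      · have : 0 < (tl.map f).sum := by omega
        rcases (ih htl).mp this with ⟨x, hx, hfx⟩
        exact ⟨x, Or.inr hx, hfx⟩
    · rintro ⟨x, rfl | hx, hfx⟩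
      · omega
      · have : 0 < (tl.map f).sum := (ih htl).mpr ⟨x, hx, hfx⟩
        omega

-- the sum of a ship's cell multiplicities over its distinct cells is its size
theorem pvSum_count_ofList (cells : List String) :
    ((PySem.Set.ofList cells).map (fun k => (cells.count k : Int))).sum
      = (cells.length : Int) := by
  have hperm : (PySem.Set.ofList cells).Perm cells.dedup := by
    rw [List.perm_ext_iff_of_nodup (PySem.Set.nodup_ofList cells) cells.nodup_dedup]
    intro a
    rw [PySem.Set.mem_ofList, List.mem_dedup]
  have := (hperm.map (fun k => (cells.count k : Int))).sum_eq
  rw [this, ← pvSum_cast, List.sum_map_count_dedup_eq_length]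

-- B's per-ship hit total, in closed form over the distinct cells
theorem pvHitsOn_eq (cells hits : List String) :
    pvHitsOn (pvTally hits) cells
      = ((PySem.Set.ofList cells).map
          (fun k => min ((cells.count k : Int)) ((hits.count k : Int)))).sum := by
  unfold pvHitsOn pvTally
  rw [PySem.Dict.foldl_insert_getD_add_one_eq_counter,
      PySem.Dict.foldl_insert_getD_add_one_eq_counter,
      PySem.Dict.items_counter, List.map_map]
  refine congrArg List.sum (List.map_congr_left ?_)
  intro k _
  simp [Function.comp, PySem.Dict.getD_counter]

-- bridge (1): A's 'ship destroyed' test equals B's 'hitsOn = size' test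
theorem pvBridge_sunk (cells hits : List String) :
    (hits.foldl pvStepInner (cells, 0)).1 = []
      ↔ pvHitsOn (pvTally hits) cells = (cells.length : Int) := by
  rw [pvInner_empty_iff, pvHitsOn_eq, ← pvSum_count_ofList cells]
  rw [pvSum_eq_iff _ _ _ (fun x _ => min_le_left _ _)]
  constructor
  · intro h x hx
    have hc := h x (PySem.Set.mem_ofList cells x |>.mp hx)
    have : (cells.count x : Int) ≤ (hits.count x : Int) := by exact_mod_cast hc
    omega
  · intro h x hx
    have hmin := h x ((PySem.Set.mem_ofList cells x).mpr hx)
    have : (cells.count x : Int) ≤ (hits.count x : Int) := by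
      rcases le_total ((cells.count x : Int)) ((hits.count x : Int)) with h' | h'
      · exact h'
      · rw [min_eq_right h'] at hmin; omega
    exact_mod_cast this

-- bridge (2): A's shipHit flag is positive iff B's hitsOn is positive
theorem pvBridge_hit (cells hits : List String) :
    (hits.foldl pvStepInner (cells, 0)).2 > 0
      ↔ pvHitsOn (pvTally hits) cells > 0 := by
  rw [pvInner_flag, pvHitsOn_eq]
  have hpos := pvSum_pos_iff (PySem.Set.ofList cells)
      (fun k => min ((cells.count k : Int)) ((hits.count k : Int)))
      (fun x _ => le_min (Int.natCast_nonneg _) (Int.natCast_nonneg _))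
  constructor
  · intro h
    refine hpos.mpr ?_
    split at h
    · rename_i hex
      rcases hex with ⟨y, hy, hyc⟩
      refine ⟨y, (PySem.Set.mem_ofList cells y).mpr hyc, ?_⟩
      have h1 : 0 < cells.count y := List.count_pos_iff.mpr hyc
      have h2 : 0 < hits.count y := List.count_pos_iff.mpr hy
      have h1' : (0:Int) < (cells.count y : Int) := by exact_mod_cast h1
      have h2' : (0:Int) < (hits.count y : Int) := by exact_mod_cast h2
      exact lt_min h1' h2'
    · omega
  · intro hsum
    rcases hpos.mp hsum with ⟨x, hx, hpos'⟩
    have hxc : x ∈ cells := (PySem.Set.mem_ofList cells x).mp hx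
    have h2' : (0:Int) < (hits.count x : Int) := lt_of_lt_of_le hpos' (min_le_right _ _)
    have h2 : 0 < hits.count x := by exact_mod_cast h2'
    have hxh : x ∈ hits := List.count_pos_iff.mp h2
    rw [if_pos ⟨x, hxh, hxc⟩]
    omega

-- one ship: A's step from a state with shipHit = 0 mirrors B's step
theorem pvStep_eq (hits : List String) (ship : String) (h sunk : Int) :
    pvStepShipA hits (0, h, sunk) ship
      = ((0 : Int), (pvStepShipB (pvTally hits) (sunk, h) ship).2,
          (pvStepShipB (pvTally hits) (sunk, h) ship).1) := by
  unfold pvStepShipA pvStepShipB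
  generalize pvSplit ship = cells
  have hs := pvBridge_sunk cells hits
  have hh := pvBridge_hit cells hits
  by_cases h1 : (hits.foldl pvStepInner (cells, 0)).1 = []
  · rw [if_pos h1, if_pos (hs.mp h1)]
  · rw [if_neg h1, if_neg (fun hc => h1 (hs.mpr hc))]
    by_cases h2 : (hits.foldl pvStepInner (cells, 0)).2 > 0
    · rw [if_pos h2, if_pos (hh.mp h2)]
    · rw [if_neg h2, if_neg (fun hc => h2 (hh.mpr hc))]
      have hz : (hits.foldl pvStepInner (cells, 0)).2 = 0 := by
        by_cases hex : ∃ hit ∈ hits, hit ∈ cells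
        · exfalso
          rw [pvInner_flag, if_pos hex] at h2
          exact h2 (by norm_num)
        · rw [pvInner_flag, if_neg hex]
      rw [hz]

-- the whole fold: A's (shipHit, h, sunk) tracks B's (sunk, damaged)
theorem pvFold_eq (hits : List String) (ships : List String) (h sunk : Int) :
    ships.foldl (pvStepShipA hits) (0, h, sunk)
      = ((0 : Int), (ships.foldl (pvStepShipB (pvTally hits)) (sunk, h)).2,
          (ships.foldl (pvStepShipB (pvTally hits)) (sunk, h)).1) := by
  induction ships generalizing h sunk with
  | nil => rfl
  | cons hd tl ih =>
    simp only [List.foldl_cons]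
    rw [pvStep_eq]
    exact ih _ _

-- ===== VERDICT (by name: the statement is the Claim_ definition above) =====
theorem calc_py_spec : Claim_equal_calc_py := by
  intro shipsExpand T _
  unfold Spec_calc_py
  show calc_py shipsExpand T = calc_py_alt shipsExpand T
  simp only [calc_py, calc_py_alt]
  rw [pvFold_eq]
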